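-- pv_equiv track=rewrite | github.com/purple-phoenix/dailyprogrammer | python_files/project_374_game_of_blobs/game_of_blobs.py | merge_blobs_helper
-- ===== SOURCE A (Python) =====
-- from typing import Tuple, List, Optional, Callable
--
-- Blob = Tuple[int, int, int]
--
-- def merge_blobs_helper(blobs: List[Blob], observed_blobs: List[Blob]) -> List[Blob]:
--     if not blobs:
--         return observed_blobs
--     else:
--         blob = blobs[0]
--         unobserved_blobs = blobs[1:]
--         updated_observed_blobs = update_observed_blobs(blob, observed_blobs)
--         return merge_blobs_helper(unobserved_blobs, updated_observed_blobs)
--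
-- def update_observed_blobs(new_blob: Blob, already_observed_blobs) -> List[Blob]:
--     if not already_observed_blobs:
--         return [new_blob]
--     observed_blob = already_observed_blobs[0]
--     rest_of_observed_blobs = already_observed_blobs[1:]
--     if positions_equal(new_blob, observed_blob):
--         merged_blob = merge_two_blobs(new_blob, observed_blob)
--         return update_observed_blobs(merged_blob, rest_of_observed_blobs)
--     else:
--         return [observed_blob] + update_observed_blobs(new_blob, rest_of_observed_blobs)
--
-- def positions_equal(blob_a: Blob, blob_b: Blob) -> bool:
--     return blob_a[0] == blob_b[0] and blob_a[1] == blob_b[1]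
--
-- def merge_two_blobs(blob_a: Blob, blob_b: Blob) -> Blob:
--     return blob_a[0], blob_b[1], (blob_a[2] + blob_b[2])
-- ===== SOURCE B (Python) =====
-- def merge_blobs_helper(blobs, observed_blobs):
--     result = list(observed_blobs)
--     for x, y, s in blobs:
--         total = s
--         kept = []
--         for b in result:
--             if b[0] == x and b[1] == y:
--                 total += b[2]
--             else:
--                 kept.append(b)
--         kept.append((x, y, total))
--         result = kept
--     return result
-- ===== Notes on version B (the rewrite author's own statement) =====
-- stated objective: simpler
-- what changed: Replaced the two mutually recursive functions with a single iterative double loop: for each blob, one forward pass sums and drops all position-matching entries and appends the merged blob at the end.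
import Mathlib
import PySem

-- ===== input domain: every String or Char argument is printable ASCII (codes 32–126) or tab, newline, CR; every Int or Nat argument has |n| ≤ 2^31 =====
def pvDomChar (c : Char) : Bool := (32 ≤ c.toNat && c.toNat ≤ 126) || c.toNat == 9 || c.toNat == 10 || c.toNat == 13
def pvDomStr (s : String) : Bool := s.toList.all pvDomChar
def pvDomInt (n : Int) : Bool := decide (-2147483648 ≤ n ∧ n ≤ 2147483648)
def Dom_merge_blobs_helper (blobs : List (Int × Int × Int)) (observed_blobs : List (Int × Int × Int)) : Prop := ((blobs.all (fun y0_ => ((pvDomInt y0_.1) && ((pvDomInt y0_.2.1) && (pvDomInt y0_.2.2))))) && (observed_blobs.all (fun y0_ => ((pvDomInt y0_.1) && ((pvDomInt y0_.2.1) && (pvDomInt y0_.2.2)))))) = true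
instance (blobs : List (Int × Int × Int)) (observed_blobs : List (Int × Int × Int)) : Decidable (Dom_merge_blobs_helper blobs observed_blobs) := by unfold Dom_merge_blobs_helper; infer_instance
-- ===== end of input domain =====

-- B replaces A's two mutually recursive functions by one iterative double loop (objective: simpler).

-- ===== PORT A =====
def positions_equal (blob_a blob_b : Int × Int × Int) : Bool :=
  blob_a.1 == blob_b.1 && blob_a.2.1 == blob_b.2.1

def merge_two_blobs (blob_a blob_b : Int × Int × Int) : Int × Int × Int :=
  (blob_a.1, blob_b.2.1, blob_a.2.2 + blob_b.2.2)

def update_observed_blobs (new_blob : Int × Int × Int) : List (Int × Int × Int) → List (Int × Int × Int)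
  | [] => [new_blob]
  | observed_blob :: rest_of_observed_blobs =>
    if positions_equal new_blob observed_blob then
      update_observed_blobs (merge_two_blobs new_blob observed_blob) rest_of_observed_blobs
    else
      observed_blob :: update_observed_blobs new_blob rest_of_observed_blobs

def merge_blobs_helper : List (Int × Int × Int) → List (Int × Int × Int) → List (Int × Int × Int)
  | [], observed_blobs => observed_blobs
  | blob :: unobserved_blobs, observed_blobs =>
    merge_blobs_helper unobserved_blobs (update_observed_blobs blob observed_blobs)

-- ===== PORT B =====
-- inner loop of Source B: accumulate (total, kept) over the current result list
def pvStepB (result : List (Int × Int × Int)) (blob : Int × Int × Int) : List (Int × Int × Int) :=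
  let tk := result.foldl
    (fun (acc : Int × List (Int × Int × Int)) b =>
      if b.1 == blob.1 && b.2.1 == blob.2.1 then (acc.1 + b.2.2, acc.2)
      else (acc.1, acc.2 ++ [b]))
    (blob.2.2, [])
  tk.2 ++ [(blob.1, blob.2.1, tk.1)]

def merge_blobs_helper_alt (blobs : List (Int × Int × Int)) (observed_blobs : List (Int × Int × Int)) : List (Int × Int × Int) :=
  blobs.foldl pvStepB observed_blobs

-- ===== PRECONDITION & SPEC =====
def Spec_merge_blobs_helper (blobs : List (Int × Int × Int)) (observed_blobs : List (Int × Int × Int)) (out : List (Int × Int × Int)) : Prop := out = merge_blobs_helper_alt blobs observed_blobs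
instance (blobs : List (Int × Int × Int)) (observed_blobs : List (Int × Int × Int)) (out : List (Int × Int × Int)) : Decidable (Spec_merge_blobs_helper blobs observed_blobs out) := by unfold Spec_merge_blobs_helper; infer_instance

-- ===== CLAIM (what is proved, stated in full; the proofs are below) =====
def Claim_equal_merge_blobs_helper : Prop := ∀ (blobs : List (Int × Int × Int)) (observed_blobs : List (Int × Int × Int)), Dom_merge_blobs_helper blobs observed_blobs → Spec_merge_blobs_helper blobs observed_blobs (merge_blobs_helper blobs observed_blobs)

-- ===== LEMMAS AND PROOFS =====

-- The inner foldl of B, started at (s, kept), drops/sums the matched entries and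
-- the final append equals A's update_observed_blobs (x,y,s), with kept as prefix.
theorem pvInner_eq (x y : Int) : ∀ (obs : List (Int × Int × Int)) (s : Int) (kept : List (Int × Int × Int)),
    (let tk := obs.foldl
      (fun (acc : Int × List (Int × Int × Int)) b =>
        if b.1 == x && b.2.1 == y then (acc.1 + b.2.2, acc.2)
        else (acc.1, acc.2 ++ [b])) (s, kept)
     tk.2 ++ [(x, y, tk.1)]) = kept ++ update_observed_blobs (x, y, s) obs := by
  intro obs
  induction obs with
  | nil => intro s kept; simp [update_observed_blobs]
  | cons ob rest ih =>
    intro s kept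
    simp only [List.foldl_cons, update_observed_blobs]
    by_cases h : ob.1 = x ∧ ob.2.1 = y
    · have hb : (ob.1 == x && ob.2.1 == y) = true := by
        simp [h.1, h.2]
      have hpe : positions_equal (x, y, s) ob = true := by
        simp [positions_equal, h.1, h.2]
      rw [if_pos hb, hpe]
      simp only [if_true]
      have : merge_two_blobs (x, y, s) ob = (x, y, s + ob.2.2) := by
        simp [merge_two_blobs, h.2]
      rw [this]
      exact ih (s + ob.2.2) kept
    · have hb : (ob.1 == x && ob.2.1 == y) = false := by
        rcases (not_and_or.mp h) with h1 | h1 <;> simp [h1]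
      have hpe : positions_equal (x, y, s) ob = false := by
        simp only [positions_equal]
        rcases (not_and_or.mp h) with h1 | h1
        · simp; intro hx; exact absurd hx.symm h1
        · simp; intro _ hy; exact absurd hy.symm h1
      rw [if_neg (by simp [hb]), hpe]
      simp only [Bool.false_eq_true, if_false]
      rw [ih s (kept ++ [ob])]
      simp
theorem pvStepB_eq (blob : Int × Int × Int) (obs : List (Int × Int × Int)) :
    pvStepB obs blob = update_observed_blobs blob obs := by
  obtain ⟨x, y, s⟩ := blob
  have := pvInner_eq x y obs s []
  simpa [pvStepB] using this

theorem pvMain : ∀ (blobs observed : List (Int × Int × Int)),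
    merge_blobs_helper blobs observed = merge_blobs_helper_alt blobs observed := by
  intro blobs
  induction blobs with
  | nil => intro observed; rfl
  | cons b rest ih =>
    intro observed
    simp only [merge_blobs_helper, merge_blobs_helper_alt, List.foldl_cons, pvStepB_eq]
    exact ih _

-- ===== VERDICT (by name: the statement is the Claim_ definition above) =====
theorem merge_blobs_helper_spec : Claim_equal_merge_blobs_helper := by
  intro blobs observed _
  exact pvMain blobs observed
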